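-- pv_equiv track=rewrite | github.com/wonies/problem-solving-algorithm | algo-before-challenge/2.python/section4/뮤직비디오.py | find_volume
-- ===== SOURCE A (Python) =====
-- def cnt_dvd(a, capacity):
--     cnt = 1
--     cur = 0
--     for element in a:
--         if (cur + element > capacity):
--             cnt += 1
--             cur = element
--         else:
--             cur += element
--     return cnt
--
-- def find_volume(a, m):
--     left = max(a)
--     right = sum(a)
--     res = 0
--     while (left <= right):
--         mid = (left + right) // 2
--         if (cnt_dvd(a, mid) <= m):
--             res = mid
--             right = mid - 1
--         else:
--             left = mid + 1
--     return res
-- ===== SOURCE B (Python) =====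
-- def find_volume(a, m):
--     # Dynamic programming over suffixes instead of binary-searching the answer:
--     # dp[i] = minimal possible maximum group sum when a[i:] is split into exactly
--     # j (possibly empty) contiguous groups; returns dp[0] for j = min(m, len(a)).
--     if m <= 0:
--         return 0
--     n = len(a)
--     g = min(m, n)
--     dp = [sum(a[i:]) for i in range(n + 1)]          # j = 1
--     for _ in range(g - 1):
--         dp = [min(max(sum(a[i:k]), dp[k]) for k in range(i, n + 1))
--               for i in range(n + 1)]
--     return dp[0]
-- ===== Notes on version B (the rewrite author's own statement) =====
-- stated objective: alternative
-- what changed: Replaces A's binary search on the answer (with a greedy feasibility counter) by a bottom-up dynamic program over suffixes: dp[i] = minimal possible maximum group sum splitting a[i:] into exactly j contiguous groups, iterated up to min(m, n) groups.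
-- outside the precondition, e.g. on find_volume([5, -3], 1): A returns 0, B returns 2
import Mathlib
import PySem

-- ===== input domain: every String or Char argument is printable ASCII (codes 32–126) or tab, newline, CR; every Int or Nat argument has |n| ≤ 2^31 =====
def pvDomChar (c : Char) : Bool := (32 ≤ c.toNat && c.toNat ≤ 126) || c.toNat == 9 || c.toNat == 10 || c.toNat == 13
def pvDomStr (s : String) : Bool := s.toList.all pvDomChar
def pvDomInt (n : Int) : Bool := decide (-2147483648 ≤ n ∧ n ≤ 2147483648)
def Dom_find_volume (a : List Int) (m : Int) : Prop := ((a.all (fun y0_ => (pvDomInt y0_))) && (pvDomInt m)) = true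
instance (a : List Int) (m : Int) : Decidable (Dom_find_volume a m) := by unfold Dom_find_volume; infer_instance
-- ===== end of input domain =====

-- B replaces A's binary search on the answer by a suffix dynamic program over cut points
-- (objective: alternative algorithm, not faster). Equivalence is claimed on nonempty lists of
-- nonnegative elements (Pre_); on [] Python A raises ValueError.

-- ===== PORT A =====
def cnt_dvd (a : List Int) (capacity : Int) : Int :=
  (a.foldl
    (fun (st : Int × Int) element =>
      if st.2 + element > capacity then (st.1 + 1, element) else (st.1, st.2 + element))
    (1, 0)).1

def findLoop (a : List Int) (m left right res : Int) : Int :=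
  if h : left ≤ right then
    let mid := PySem.Int.floordiv (left + right) 2
    if cnt_dvd a mid ≤ m then findLoop a m left (mid - 1) mid
    else findLoop a m (mid + 1) right res
  else res
termination_by (right + 1 - left).toNat
decreasing_by
  · have := PySem.Int.floordiv_two_mid_bounds h; omega
  · have := PySem.Int.floordiv_two_mid_bounds h; omega

-- Python's max(a) raises ValueError on []; Pre_ excludes a = [], so the .getD 0 default is unreachable.
def find_volume (a : List Int) (m : Int) : Int :=
  findLoop a m ((PySem.List.max? a (fun x => x)).getD 0) a.sum 0

-- ===== PORT B =====
-- Source B: dp = [sum(a[i:]) for i in range(n + 1)]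
def altRow1 (a : List Int) : List Int :=
  (List.range (a.length + 1)).map (fun i => (a.drop i).sum)

-- Source B: dp = [min(max(sum(a[i:k]), dp[k]) for k in range(i, n + 1)) for i in range(n + 1)]
def altStep (a : List Int) (dp : List Int) : List Int :=
  (List.range (a.length + 1)).map (fun i =>
    ((PySem.List.min?
        ((List.range' i (a.length + 1 - i)).map
          (fun k => max ((a.drop i).take (k - i)).sum (dp.getD k 0)))
        (fun x => x)).getD 0))

def find_volume_alt (a : List Int) (m : Int) : Int :=
  if m ≤ 0 then 0
  else
    let g := min m (a.length : Int)
    (((altStep a)^[(g - 1).toNat]) (altRow1 a)).getD 0 0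

-- ===== PRECONDITION & SPEC =====
-- Pre_ excludes a = [], where Python A raises ValueError (max([])), and — only when m ≥ 1 —
-- lists with a negative element: there the predicate A bisects is not monotone, so the value A
-- returns is an artefact of its search path (for m ≤ 0 both programs return 0 on any list).
def Pre_find_volume (a : List Int) (m : Int) : Prop := a ≠ [] ∧ (m ≤ 0 ∨ ∀ x ∈ a, 0 ≤ x)
instance (a : List Int) (m : Int) : Decidable (Pre_find_volume a m) := by
  unfold Pre_find_volume; infer_instance

def pvWitness_find_volume : List Int × Int := ([9, 1, 2, 3], 2)

def Spec_find_volume (a : List Int) (m : Int) (out : Int) : Prop := out = find_volume_alt a m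
instance (a : List Int) (m : Int) (out : Int) : Decidable (Spec_find_volume a m out) := by
  unfold Spec_find_volume; infer_instance

-- ===== CLAIM (what is proved, stated in full; the proofs are below) =====
def Claim_equal_find_volume : Prop := ∀ (a : List Int) (m : Int), Dom_find_volume a m → Pre_find_volume a m → Spec_find_volume a m (find_volume a m)

-- ===== LEMMAS AND PROOFS =====

-- greedy break counter: cnt_dvd a c = 1 + brks c 0 a
def brks (c : Int) : Int → List Int → Nat
  | _, [] => 0
  | cur, e :: t => if cur + e > c then brks c e t + 1 else brks c (cur + e) t

theorem brks_foldl (c : Int) : ∀ (l : List Int) (k cur : Int),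
    (l.foldl
      (fun (st : Int × Int) element =>
        if st.2 + element > c then (st.1 + 1, element) else (st.1, st.2 + element))
      (k, cur)).1 = k + (brks c cur l : Int)
  | [], k, cur => by simp [brks]
  | e :: t, k, cur => by
    by_cases h : cur + e > c
    · simp only [List.foldl_cons, if_pos h, brks, brks_foldl c t (k + 1) e]
      push_cast; ring
    · simp only [List.foldl_cons, if_neg h, brks, brks_foldl c t k (cur + e)]

theorem cnt_dvd_eq_brks (a : List Int) (c : Int) : cnt_dvd a c = 1 + (brks c 0 a : Int) := by
  simp [cnt_dvd, brks_foldl]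

theorem brks_le_length (c : Int) : ∀ (l : List Int) (cur : Int), brks c cur l ≤ l.length
  | [], _ => by simp [brks]
  | e :: t, cur => by
    by_cases h : cur + e > c <;>
      simp only [brks, h, List.length_cons, ite_true, ite_false] <;>
      have := brks_le_length c t <;> first
        | exact Nat.succ_le_succ (this e)
        | exact Nat.le_succ_of_le (this (cur + e))

-- monotone in cur, and shifting cur up costs at most one extra break
theorem brks_mono_off (c : Int) : ∀ (l : List Int), (∀ x ∈ l, 0 ≤ x) →
    ∀ x y : Int, 0 ≤ x → x ≤ y →
      brks c x l ≤ brks c y l ∧ brks c y l ≤ brks c x l + 1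
  | [], _, _, _, _, _ => by simp [brks]
  | e :: t, h, x, y, hx, hxy => by
    have he : 0 ≤ e := h e (List.mem_cons_self ..)
    have ht : ∀ z ∈ t, 0 ≤ z := fun z hz => h z (List.mem_cons_of_mem _ hz)
    by_cases hy : y + e > c
    · by_cases hxe : x + e > c
      · simp [brks, if_pos hy, if_pos hxe]
      · have h2 := brks_mono_off c t ht e (x + e) he (by omega)
        simp only [brks, if_pos hy, if_neg hxe]
        omega
    · have hxe : ¬ x + e > c := by omega
      simp only [brks, if_neg hy, if_neg hxe]
      exact brks_mono_off c t ht (x + e) (y + e) (by omega) (by omega)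

-- the break count is antitone in the capacity (nonnegative elements)
theorem brks_anti (c c' : Int) (hcc : c ≤ c') : ∀ (l : List Int), (∀ x ∈ l, 0 ≤ x) →
    ∀ cur cur' : Int, 0 ≤ cur' → cur' ≤ cur → brks c' cur' l ≤ brks c cur l
  | [], _, _, _, _, _ => by simp [brks]
  | e :: t, h, cur, cur', hc', hcc' => by
    have he : 0 ≤ e := h e (List.mem_cons_self ..)
    have ht : ∀ z ∈ t, 0 ≤ z := fun z hz => h z (List.mem_cons_of_mem _ hz)
    by_cases h1 : cur' + e > c'
    · have h2 : cur + e > c := by omega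
      simp only [brks, if_pos h1, if_pos h2]
      exact Nat.succ_le_succ (brks_anti c c' hcc t ht e e he le_rfl)
    · by_cases h2 : cur + e > c
      · simp only [brks, if_neg h1, if_pos h2]
        have o := (brks_mono_off c' t ht e (cur' + e) he (by omega)).2
        have := brks_anti c c' hcc t ht e e he le_rfl
        omega
      · simp only [brks, if_neg h1, if_neg h2]
        exact brks_anti c c' hcc t ht (cur + e) (cur' + e) (by omega) (by omega)

-- a block whose sum still fits produces no break
theorem brks_append (c : Int) : ∀ (p l : List Int) (cur : Int), (∀ x ∈ p, 0 ≤ x) →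
    cur + p.sum ≤ c → brks c cur (p ++ l) = brks c (cur + p.sum) l
  | [], l, cur, _, _ => by simp
  | e :: p', l, cur, h, hs => by
    have hp' : ∀ z ∈ p', 0 ≤ z := fun z hz => h z (List.mem_cons_of_mem _ hz)
    have hps : 0 ≤ p'.sum := List.sum_nonneg hp'
    have hnb : ¬ cur + e > c := by
      simp only [List.sum_cons] at hs; omega
    simp only [List.cons_append, brks, if_neg hnb]
    rw [brks_append c p' l (cur + e) hp' (by simp only [List.sum_cons] at hs; omega)]
    congr 1
    simp only [List.sum_cons]
    ring

-- a split of l into exactly j contiguous (possibly empty) groups, each of sum ≤ c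
def Feas (j : Nat) (c : Int) (l : List Int) : Prop :=
  ∃ parts : List (List Int), parts.length = j ∧ parts.flatten = l ∧ ∀ p ∈ parts, p.sum ≤ c

-- greedy optimality: no split into j groups beats the greedy break count
theorem greedy_min (c : Int) : ∀ (parts : List (List Int)), parts ≠ [] →
    (∀ x ∈ parts.flatten, 0 ≤ x) → (∀ p ∈ parts, p.sum ≤ c) →
    brks c 0 parts.flatten + 1 ≤ parts.length
  | [], h, _, _ => absurd rfl h
  | p :: ps, _, hnn, hsum => by
    have hp : ∀ x ∈ p, 0 ≤ x := fun x hx => hnn x (by simp [List.mem_flatten]; exact Or.inl hx)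
    have hpc : (0 : Int) + p.sum ≤ c := by
      have := hsum p (List.mem_cons_self ..); omega
    rw [List.flatten_cons, brks_append c p ps.flatten 0 hp hpc]
    match ps with
    | [] => simp [brks]
    | q :: qs =>
      have hrest : ∀ x ∈ (q :: qs).flatten, 0 ≤ x := fun x hx => hnn x (by
        rw [List.flatten_cons]; exact List.mem_append_right _ hx)
      have ih := greedy_min c (q :: qs) (by simp) hrest
        (fun r hr => hsum r (List.mem_cons_of_mem _ hr))
      have off := (brks_mono_off c (q :: qs).flatten hrest 0 (0 + p.sum)
        le_rfl (by have := List.sum_nonneg hp; omega)).2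
      simp only [List.length_cons] at ih ⊢
      omega

-- the greedy run yields an actual split into (brks + 1) groups
theorem greedy_build (c : Int) : ∀ (l : List Int), (∀ x ∈ l, 0 ≤ x) → (∀ x ∈ l, x ≤ c) →
    ∀ cur : Int, 0 ≤ cur → cur ≤ c →
    ∃ (first : List Int) (parts : List (List Int)),
      first ++ parts.flatten = l ∧ parts.length = brks c cur l ∧
      cur + first.sum ≤ c ∧ ∀ p ∈ parts, p.sum ≤ c
  | [], _, _, cur, _, hc => ⟨[], [], by simp, by simp [brks], by simpa using hc, by simp⟩
  | e :: t, hnn, hub, cur, hcur, hc => by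
    have he : 0 ≤ e := hnn e (List.mem_cons_self ..)
    have hec : e ≤ c := hub e (List.mem_cons_self ..)
    have ht : ∀ z ∈ t, 0 ≤ z := fun z hz => hnn z (List.mem_cons_of_mem _ hz)
    have htc : ∀ z ∈ t, z ≤ c := fun z hz => hub z (List.mem_cons_of_mem _ hz)
    by_cases hbr : cur + e > c
    · obtain ⟨first', parts', hf, hl, hs, hps⟩ := greedy_build c t ht htc e he hec
      refine ⟨[], (e :: first') :: parts', by simp [hf], ?_, by simpa using hc, ?_⟩
      · simp only [List.length_cons, brks, if_pos hbr, hl]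
      · intro p hp
        rcases List.mem_cons.1 hp with h | h
        · subst h; simp only [List.sum_cons]; omega
        · exact hps p h
    · obtain ⟨first', parts', hf, hl, hs, hps⟩ := greedy_build c t ht htc (cur + e) (by omega) (by omega)
      refine ⟨e :: first', parts', by simp [hf], ?_, ?_, hps⟩
      · simp only [brks, if_neg hbr, hl]
      · simp only [List.sum_cons]; omega

theorem feas_pad (c : Int) (hc : 0 ≤ c) {j k : Nat} (hjk : j ≤ k) {l : List Int}
    (h : Feas j c l) : Feas k c l := by
  obtain ⟨parts, hlen, hfl, hsum⟩ := h
  refine ⟨List.replicate (k - j) [] ++ parts, by simp [hlen]; omega, ?_, ?_⟩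
  · rw [List.flatten_append]
    have : (List.replicate (k - j) ([] : List Int)).flatten = [] := by
      simp
    rw [this, List.nil_append, hfl]
  · intro p hp
    rcases List.mem_append.1 hp with h | h
    · rw [List.eq_of_mem_replicate h]; simpa using hc
    · exact hsum p h

theorem altRow1_getD (a : List Int) {i : Nat} (hi : i ≤ a.length) :
    (altRow1 a).getD i 0 = (a.drop i).sum := by
  rw [altRow1, List.getD_eq_getElem _ _ (by simpa using Nat.lt_succ_of_le hi)]
  simp

theorem minD_le_iff {l : List Int} (hl : l ≠ []) (c : Int) :
    ((PySem.List.min? l (fun x => x)).getD 0 ≤ c ↔ ∃ x ∈ l, x ≤ c) := by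
  cases h : PySem.List.min? l (fun x => x) with
  | none => exact absurd ((PySem.List.min?_eq_none_iff l _).1 h) hl
  | some v =>
    simp only [Option.getD_some]
    constructor
    · exact fun hv => ⟨v, PySem.List.min?_mem h, hv⟩
    · rintro ⟨x, hx, hxc⟩
      exact le_trans (PySem.List.min?_isMin h x hx) hxc

theorem altStep_le_iff (a dp : List Int) {i : Nat} (hi : i ≤ a.length) (c : Int) :
    ((altStep a dp).getD i 0 ≤ c ↔
      ∃ k, i ≤ k ∧ k ≤ a.length ∧ ((a.drop i).take (k - i)).sum ≤ c ∧ dp.getD k 0 ≤ c) := by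
  rw [altStep, List.getD_eq_getElem _ _ (by simpa using Nat.lt_succ_of_le hi)]
  rw [List.getElem_map, List.getElem_range]
  rw [minD_le_iff (by simp; omega) c]
  constructor
  · rintro ⟨x, hx, hxc⟩
    rw [List.mem_map] at hx
    obtain ⟨k, hk, rfl⟩ := hx
    rw [List.mem_range'] at hk
    obtain ⟨d, hd, rfl⟩ := hk
    rw [max_le_iff] at hxc
    exact ⟨i + d, by omega, by omega, by simpa using hxc.1, by simpa using hxc.2⟩
  · rintro ⟨k, hik, hkn, hseg, hdp⟩
    refine ⟨max ((a.drop i).take (k - i)).sum (dp.getD k 0), ?_, by omega⟩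
    rw [List.mem_map]
    exact ⟨k, by rw [List.mem_range']; exact ⟨k - i, by omega, by omega⟩, rfl⟩

theorem feas_one_iff (c : Int) (l : List Int) : Feas 1 c l ↔ l.sum ≤ c := by
  constructor
  · rintro ⟨parts, hlen, hfl, hsum⟩
    rw [List.length_eq_one_iff] at hlen
    obtain ⟨p, rfl⟩ := hlen
    simp only [List.flatten_cons, List.flatten_nil, List.append_nil] at hfl
    subst hfl
    exact hsum _ (List.mem_cons_self ..)
  · exact fun h => ⟨[l], rfl, by simp, by simpa using h⟩

theorem feas_succ_iff (c : Int) (a : List Int) {i : Nat} (hi : i ≤ a.length) (j : Nat) :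
    Feas (j + 1) c (a.drop i) ↔
      ∃ k, i ≤ k ∧ k ≤ a.length ∧ ((a.drop i).take (k - i)).sum ≤ c ∧ Feas j c (a.drop k) := by
  constructor
  · rintro ⟨parts, hlen, hfl, hsum⟩
    match parts, hlen with
    | p :: ps, hlen =>
      rw [List.flatten_cons] at hfl
      have hplen : p.length ≤ a.length - i := by
        have := congrArg List.length hfl
        simp only [List.length_append, List.length_drop] at this
        omega
      refine ⟨i + p.length, by omega, by omega, ?_, ?_⟩
      · have htake : (a.drop i).take (i + p.length - i) = p := by
          rw [Nat.add_sub_cancel_left, ← hfl, List.take_left]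
        rw [htake]
        exact hsum p (List.mem_cons_self ..)
      · have hdrop : a.drop (i + p.length) = ps.flatten := by
          rw [← List.drop_drop, ← hfl, List.drop_left]
        rw [hdrop]
        exact ⟨ps, by simpa using hlen, rfl, fun q hq => hsum q (List.mem_cons_of_mem _ hq)⟩
  · rintro ⟨k, hik, hkn, hseg, ⟨ps, hlen, hfl, hsum⟩⟩
    refine ⟨(a.drop i).take (k - i) :: ps, by simp [hlen], ?_, ?_⟩
    · rw [List.flatten_cons, hfl]
      have : a.drop k = (a.drop i).drop (k - i) := by
        rw [List.drop_drop]; congr 1; omega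
      rw [this, List.take_append_drop]
    · intro p hp
      rcases List.mem_cons.1 hp with h | h
      · subst h; exact hseg
      · exact hsum p h

def DpB (a : List Int) (j : Nat) : List Int := (altStep a)^[j] (altRow1 a)

theorem dp_le_iff (a : List Int) : ∀ (j i : Nat), i ≤ a.length → ∀ c : Int,
    ((DpB a j).getD i 0 ≤ c ↔ Feas (j + 1) c (a.drop i))
  | 0, i, hi, c => by
    rw [DpB, Function.iterate_zero_apply, altRow1_getD a hi, feas_one_iff]
  | j + 1, i, hi, c => by
    rw [DpB, Function.iterate_succ_apply', ← DpB]
    rw [altStep_le_iff a (DpB a j) hi c, feas_succ_iff c a hi (j + 1)]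
    constructor
    · rintro ⟨k, h1, h2, h3, h4⟩
      exact ⟨k, h1, h2, h3, (dp_le_iff a j k h2 c).1 h4⟩
    · rintro ⟨k, h1, h2, h3, h4⟩
      exact ⟨k, h1, h2, h3, (dp_le_iff a j k h2 c).2 h4⟩

theorem findLoop_none (a : List Int) (m : Int) (hm : ∀ c, ¬ cnt_dvd a c ≤ m) :
    ∀ l r res : Int, findLoop a m l r res = res := by
  have H : ∀ (fuel : Nat) (l r res : Int), (r + 1 - l).toNat ≤ fuel →
      findLoop a m l r res = res := by
    intro fuel
    induction fuel with
    | zero =>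
      intro l r res hf
      rw [findLoop.eq_def]
      rw [dif_neg (by omega)]
    | succ f ih =>
      intro l r res hf
      rw [findLoop.eq_def]
      by_cases h : l ≤ r
      · rw [dif_pos h]
        have hmid := PySem.Int.floordiv_two_mid_bounds h
        simp only [if_neg (hm _)]
        exact ih _ _ _ (by omega)
      · rw [dif_neg h]
  exact fun l r res => H (r + 1 - l).toNat l r res le_rfl

theorem findLoop_eq (a : List Int) (m mx W : Int)
    (hPW : cnt_dvd a W ≤ m)
    (hlb : ∀ c, mx ≤ c → cnt_dvd a c ≤ m → W ≤ c)
    (hanti : ∀ c c', c ≤ c' → cnt_dvd a c ≤ m → cnt_dvd a c' ≤ m) :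
    ∀ l r res : Int, mx ≤ l → l ≤ W → (W ≤ r ∨ (res = W ∧ W = r + 1)) →
      findLoop a m l r res = W := by
  have H : ∀ (fuel : Nat) (l r res : Int), (r + 1 - l).toNat ≤ fuel →
      mx ≤ l → l ≤ W → (W ≤ r ∨ (res = W ∧ W = r + 1)) → findLoop a m l r res = W := by
    intro fuel
    induction fuel with
    | zero =>
      intro l r res hf h1 h2 h3
      rw [findLoop.eq_def, dif_neg (by omega)]
      rcases h3 with h3 | h3
      · omega
      · exact h3.1
    | succ f ih =>
      intro l r res hf h1 h2 h3
      rw [findLoop.eq_def]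
      by_cases h : l ≤ r
      · rw [dif_pos h]
        have hmid := PySem.Int.floordiv_two_mid_bounds h
        set mid := PySem.Int.floordiv (l + r) 2 with hmiddef
        by_cases hp : cnt_dvd a mid ≤ m
        · rw [if_pos hp]
          have hWmid : W ≤ mid := hlb mid (by omega) hp
          by_cases hw : W ≤ mid - 1
          · exact ih l (mid - 1) mid (by omega) h1 h2 (Or.inl hw)
          · exact ih l (mid - 1) mid (by omega) h1 h2 (Or.inr ⟨by omega, by omega⟩)
        · rw [if_neg hp]
          have hmidW : ¬ W ≤ mid := fun hle => hp (hanti W mid hle hPW)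
          exact ih (mid + 1) r res (by omega) (by omega) (by omega) (by
            rcases h3 with h3 | h3
            · exact Or.inl h3
            · exact Or.inr h3)
      · rw [dif_neg h]
        rcases h3 with h3 | h3
        · omega
        · exact h3.1
  exact fun l r res => H (r + 1 - l).toNat l r res le_rfl

-- ===== VERDICT (by name: the statement is the Claim_ definition above) =====
theorem find_volume_spec : Claim_equal_find_volume := by
  intro a m _ hpre
  obtain ⟨hne, hpre2⟩ := hpre
  unfold Spec_find_volume find_volume find_volume_alt
  by_cases hm : m ≤ 0
  · rw [if_pos hm]
    apply findLoop_none
    intro c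
    rw [cnt_dvd_eq_brks]
    omega
  · have hnn : ∀ x ∈ a, 0 ≤ x := hpre2.resolve_left hm
    rw [if_neg hm]
    show findLoop a m ((PySem.List.max? a (fun x => x)).getD 0) a.sum 0 =
      (DpB a ((min m (a.length : Int) - 1).toNat)).getD 0 0
    set G : Nat := (min m (a.length : Int) - 1).toNat with hG
    set W : Int := (DpB a G).getD 0 0 with hWdef
    have hn1 : 0 < a.length := List.length_pos_iff.mpr hne
    have hm1 : 1 ≤ m := by omega
    have hmin1 : (1 : Int) ≤ min m (a.length : Int) := le_min hm1 (by exact_mod_cast hn1)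
    have hG1 : (G : Int) + 1 = min m (a.length : Int) := by
      rw [hG, Int.toNat_of_nonneg (by omega)]; ring
    obtain ⟨v, hv⟩ : ∃ v, PySem.List.max? a (fun x => x) = some v := by
      cases h : PySem.List.max? a (fun x => x) with
      | none => exact absurd ((PySem.List.max?_eq_none_iff a _).1 h) hne
      | some v => exact ⟨v, rfl⟩
    have hvmem : v ∈ a := PySem.List.max?_mem hv
    have hvmax : ∀ y ∈ a, y ≤ v := fun y hy => PySem.List.max?_isMax hv y hy
    have hv0 : 0 ≤ v := hnn v hvmem
    rw [hv]
    simp only [Option.getD_some]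
    have hWfeas : Feas (G + 1) W a := by
      have := (dp_le_iff a G 0 (Nat.zero_le _) W).1 le_rfl
      simpa using this
    obtain ⟨parts, hplen, hpfl, hpsum⟩ := hWfeas
    have hflnn : ∀ x ∈ parts.flatten, 0 ≤ x := by rw [hpfl]; exact hnn
    have hvW : v ≤ W := by
      have hvfl : v ∈ parts.flatten := by rw [hpfl]; exact hvmem
      obtain ⟨p, hp, hvp⟩ := List.mem_flatten.1 hvfl
      have hle : v ≤ p.sum :=
        List.single_le_sum (fun x hx => hflnn x (List.mem_flatten.2 ⟨p, hp, hx⟩)) v hvp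
      exact le_trans hle (hpsum p hp)
    have hPW : cnt_dvd a W ≤ m := by
      have hne' : parts ≠ [] := by intro h; rw [h] at hplen; simp at hplen
      have hgm := greedy_min W parts hne' hflnn hpsum
      rw [hpfl, hplen] at hgm
      rw [cnt_dvd_eq_brks]
      have hGm : (G : Int) + 1 ≤ m := by rw [hG1]; exact min_le_left _ _
      omega
    have hlb : ∀ c, v ≤ c → cnt_dvd a c ≤ m → W ≤ c := by
      intro c hvc hcnt
      have hc0 : 0 ≤ c := le_trans hv0 hvc
      obtain ⟨first, parts', hf, hl, hs, hps⟩ :=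
        greedy_build c a hnn (fun x hx => le_trans (hvmax x hx) hvc) 0 le_rfl hc0
      have hfeas : Feas (brks c 0 a + 1) c a := by
        refine ⟨first :: parts', by simp [hl], by simpa using hf, ?_⟩
        intro p hp
        rcases List.mem_cons.1 hp with h | h
        · subst h; omega
        · exact hps p h
      have hbn : brks c 0 a + 1 ≤ a.length := by
        match a, hne, hnn, hvmax with
        | e :: t, _, hnn, hvmax =>
          have hnb : ¬ (0 : Int) + e > c := by
            have := hvmax e (List.mem_cons_self ..); omega
          show brks c 0 (e :: t) + 1 ≤ (e :: t).length
          simp only [brks, if_neg hnb, List.length_cons]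
          have := brks_le_length c t (0 + e)
          omega
      have hbm : (brks c 0 a : Int) + 1 ≤ m := by rw [cnt_dvd_eq_brks] at hcnt; omega
      have hbmin : (brks c 0 a : Int) + 1 ≤ (G : Int) + 1 := by
        rw [hG1]; exact le_min hbm (by exact_mod_cast hbn)
      have hble : brks c 0 a + 1 ≤ G + 1 := by omega
      exact (dp_le_iff a G 0 (Nat.zero_le _) c).2 (by simpa using feas_pad c hc0 hble hfeas)
    have hanti : ∀ c c', c ≤ c' → cnt_dvd a c ≤ m → cnt_dvd a c' ≤ m := by
      intro c c' hcc h
      rw [cnt_dvd_eq_brks] at h ⊢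
      have := brks_anti c c' hcc a hnn 0 0 le_rfl le_rfl
      omega
    have hWS : W ≤ a.sum := by
      have h1 : Feas 1 a.sum a := (feas_one_iff _ _).2 le_rfl
      have hsum0 : 0 ≤ a.sum := List.sum_nonneg hnn
      exact (dp_le_iff a G 0 (Nat.zero_le _) a.sum).2
        (by simpa using feas_pad _ hsum0 (by omega) h1)
    exact findLoop_eq a m v W hPW hlb hanti v a.sum 0 le_rfl hvW (Or.inl hWS)
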